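-- pv_equiv track=rewrite | github.com/NeolexDev/CodingAccelerator-EpreuvesAir | air03.py | ret_intruder
-- ===== SOURCE A (Python) =====
-- def ret_intruder(strings):
--   count_map = {}
--   for string in strings:
--     if string not in count_map:
--       count_map[string] = 1
--     else:
--       count_map[string] += 1
--   return [k for k, v in count_map.items() if v == 1][0]
-- ===== SOURCE B (Python) =====
-- def ret_intruder(strings):
--   # Recursive elimination: if the first element is unrepeated it is the answer;
--   # otherwise discard every copy of it and recurse on the shorter remainder.
--   head, rest = strings[0], strings[1:]
--   if head not in rest:
--     return head
--   return ret_intruder([s for s in rest if s != head])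
-- ===== Notes on version B (the rewrite author's own statement) =====
-- stated objective: alternative
-- what changed: Replaces the count-dict build plus items filter by recursive elimination: test whether the head is repeated; if so, delete all its copies and recurse on the remainder, so no frequency map is ever built.
import Mathlib
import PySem

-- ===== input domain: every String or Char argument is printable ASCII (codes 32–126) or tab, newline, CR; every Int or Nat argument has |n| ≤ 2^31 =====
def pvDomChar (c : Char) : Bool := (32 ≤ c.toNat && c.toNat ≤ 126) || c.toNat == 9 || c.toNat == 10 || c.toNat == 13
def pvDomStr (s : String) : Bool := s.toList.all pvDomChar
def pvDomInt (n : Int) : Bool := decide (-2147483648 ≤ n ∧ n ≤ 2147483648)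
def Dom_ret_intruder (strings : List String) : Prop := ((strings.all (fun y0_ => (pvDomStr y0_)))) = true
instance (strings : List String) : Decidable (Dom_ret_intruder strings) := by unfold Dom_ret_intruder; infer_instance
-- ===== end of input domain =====

-- B replaces A's count-dict build + items filter by recursive elimination of repeated heads; objective: alternative.

-- ===== PORT A =====
def ret_intruder (strings : List String) : String :=
  let count_map : PySem.Dict String Int :=
    strings.foldl
      (fun d s => if !(d.contains s) then d.insert s 1 else d.insert s (d.getD s 0 + 1))
      PySem.Dict.empty
  -- [k for k, v in count_map.items() if v == 1][0]; the final [0] raises IndexError on an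
  -- empty comprehension — excluded by Pre_, the .getD "" is never reached under Pre_.
  (PySem.List.pyGet? ((count_map.items.filter (fun kv : String × Int => kv.2 == 1)).map Prod.fst) 0).getD ""

-- ===== PORT B =====
-- strings[0] raises IndexError on []; that branch returns "" but is excluded by Pre_.
def ret_intruder_alt : List String → String
  | [] => ""
  | head :: rest =>
    if head ∈ rest then
      ret_intruder_alt (rest.filter (fun s => s ≠ head))
    else
      head
termination_by l => l.length
decreasing_by
  simp only [List.length_unattach, List.length_cons, Nat.lt_succ_iff]
  exact le_trans (List.length_filter_le _ _) (by simp)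

-- ===== PRECONDITION & SPEC =====
-- Pre_ excludes exactly the inputs on which A (and B) raises IndexError: lists with no
-- element occurring exactly once (including the empty list).
def Pre_ret_intruder (strings : List String) : Prop :=
  (strings.any (fun s => strings.count s == 1)) = true
instance (strings : List String) : Decidable (Pre_ret_intruder strings) := by
  unfold Pre_ret_intruder; infer_instance
def pvWitness_ret_intruder : List String := ["a", "b", "a"]

def Spec_ret_intruder (strings : List String) (out : String) : Prop := out = ret_intruder_alt strings
instance (strings : List String) (out : String) : Decidable (Spec_ret_intruder strings out) := by unfold Spec_ret_intruder; infer_instance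

-- ===== CLAIM (what is proved, stated in full; the proofs are below) =====
def Claim_equal_ret_intruder : Prop := ∀ (strings : List String), Dom_ret_intruder strings → Pre_ret_intruder strings → Spec_ret_intruder strings (ret_intruder strings)

-- ===== LEMMAS AND PROOFS =====

-- A's loop is exactly Counter(strings): in the 'not in' branch getD is the default 0.
lemma fold_eq_counter (strings : List String) :
    strings.foldl
      (fun d s => if !(d.contains s) then d.insert s 1 else d.insert s (d.getD s 0 + 1))
      PySem.Dict.empty = PySem.Dict.counter strings := by
  rw [← PySem.Dict.foldl_insert_getD_add_one_eq_counter]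
  apply PySem.List.foldl_congr_mem
  intro d s _
  by_cases h : d.contains s = true
  · simp [h]
  · simp only [Bool.not_eq_true] at h
    have h0 : d.getD s (0:Int) = 0 := PySem.Dict.getD_of_not_contains d 0 h
    simp [h, h0]

-- first match in a Set built from l = first match in l.
lemma find?_foldl_add {α : Type} [DecidableEq α] (p : α → Bool) (l s : List α) :
    List.find? p (l.foldl PySem.Set.add s) = (List.find? p s).or (List.find? p l) := by
  induction l generalizing s with
  | nil => simp
  | cons a t ih =>
    simp only [List.foldl_cons, ih, List.find?_cons]
    by_cases hc : PySem.Set.contains s a = true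
    · have hmem : a ∈ s := (PySem.Set.contains_iff s a).mp hc
      simp only [PySem.Set.add, hc, if_pos]
      cases hfs : List.find? p s with
      | some y => simp
      | none =>
        have := List.find?_eq_none.mp hfs
        have hpa : p a = false := by
          have := this a hmem
          simpa using this
        simp [hpa]
    · simp only [PySem.Set.add, hc, if_neg, Bool.false_eq_true, not_false_iff]
      rw [List.find?_append]
      cases hpa : p a <;> simp [hpa]

lemma find?_ofList {α : Type} [DecidableEq α] (p : α → Bool) (l : List α) :
    List.find? p (PySem.Set.ofList l) = List.find? p l := by
  rw [PySem.Set.ofList_eq_foldl, find?_foldl_add]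
  simp

lemma head?_filter_eq_find? {α : Type} (p : α → Bool) (l : List α) :
    (l.filter p).head? = l.find? p := by
  induction l with
  | nil => rfl
  | cons a t ih => by_cases h : p a = true <;> simp [h, ih]

-- A computes (first element of count exactly 1, if any).getD "".
lemma ret_intruder_eq_find (strings : List String) :
    ret_intruder strings
      = (List.find? (fun s => strings.count s == 1) strings).getD "" := by
  unfold ret_intruder
  rw [fold_eq_counter]
  simp only [PySem.Dict.items_counter, List.filter_map, List.map_map,
    PySem.List.pyGet?_zero, ← List.head?_eq_getElem?]
  have hmap : (fun kv : String × Int => kv.2 == 1) ∘ (fun k => (k, (strings.count k : Int)))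
      = fun k => (strings.count k == 1) := by
    funext k
    simp only [Function.comp]
    by_cases h : strings.count k = 1 <;> simp [h]
  have hfst : Prod.fst ∘ (fun k : String => (k, (strings.count k : Int))) = id := by
    funext k; rfl
  rw [hmap, hfst, List.map_id]
  rw [head?_filter_eq_find?, find?_ofList]

-- find? is determined by the predicate's values on the list's members.
lemma find?_congr' {α : Type} {p q : α → Bool} (l : List α) (h : ∀ x ∈ l, p x = q x) :
    l.find? p = l.find? q := by
  induction l with
  | nil => rfl
  | cons a t ih =>
    rw [List.find?_cons, List.find?_cons, h a (List.mem_cons_self)]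
    exact match q a with
    | true => rfl
    | false => ih (fun x hx => h x (List.mem_cons_of_mem _ hx))

-- B computes the same first-unique element, by strong induction on the length.
lemma ret_intruder_alt_eq_find (strings : List String) :
    ret_intruder_alt strings
      = (List.find? (fun s => strings.count s == 1) strings).getD "" := by
  induction hl : strings.length using Nat.strong_induction_on generalizing strings with
  | _ n ih =>
  cases strings with
  | nil =>
    unfold ret_intruder_alt
    rfl
  | cons head rest =>
    by_cases hmem : head ∈ rest
    · -- repeated head: A skips it (count ≥ 2) and B deletes its copies
      have hcnt : ((head :: rest).count head == 1) = false := by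
        have h1 : 1 ≤ rest.count head := List.one_le_count_iff.mpr hmem
        simp [List.count_cons_self]
        omega
      unfold ret_intruder_alt
      simp only [hmem, if_pos]
      have hlen : (rest.filter (fun s => s ≠ head)).length < n := by
        subst hl
        exact Nat.lt_succ_of_le (List.length_filter_le _ _)
      rw [ih _ hlen _ rfl]
      rw [List.find?_cons_of_neg (by simp only [hcnt]; exact Bool.false_ne_true)]
      congr 1
      rw [List.find?_filter]
      apply find?_congr'
      intro x hx
      by_cases hxh : x = head
      · subst hxh
        have h1 : 1 ≤ rest.count x := List.one_le_count_iff.mpr hmem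
        simp [List.count_cons_self]
        omega
      · have hf : (rest.filter (fun s => s ≠ head)).count x = rest.count x :=
          List.count_filter (by simpa using hxh)
        have hhx : ¬ head = x := fun h => hxh h.symm
        simp [hxh, hhx]
        cases hc : List.count x rest == 1 <;> simp_all
    · -- unrepeated head: both return it
      unfold ret_intruder_alt
      simp only [hmem, if_neg, not_false_iff]
      have h0 : rest.count head = 0 := List.count_eq_zero.mpr hmem
      rw [List.find?_cons_of_pos (by simp [List.count_cons_self, h0])]
      rfl

-- ===== VERDICT (by name: the statement is the Claim_ definition above) =====
theorem ret_intruder_spec : Claim_equal_ret_intruder := by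
  intro strings _ _
  unfold Spec_ret_intruder
  rw [ret_intruder_eq_find, ret_intruder_alt_eq_find]
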